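-- pv_equiv track=rewrite | github.com/dunkdunkdunk/ComProg1 | final_2565_nested.py | get_frequency_matrix
-- ===== SOURCE A (Python) =====
-- from collections import OrderedDict
--
-- def get_frequency_matrix(dnas):
--     check=[]
--     A,T,C,G=[],[],[],[]
--     for i in dnas:
--         check.append(len(i))
--     if len(set(check))>1:return "Found incorrect DNA length"
--     for i in range(check[0]):
--         l=OrderedDict([('A',0),('T',0),('C',0),('G',0)])
--         for j in dnas:
--             if j[i] in l.keys():
--                 l[j[i]]+=1
--             else:return "Found incorrect nucleotide"
--         ans=list(map(str,l.values()))
--         A.append(ans[0]);T.append(ans[1]);C.append(ans[2]);G.append(ans[3])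
--     return ','.join(A)+'\n'+','.join(T)+'\n'+','.join(C)+'\n'+','.join(G)
-- ===== SOURCE B (Python) =====
-- from collections import Counter
--
-- def get_frequency_matrix(dnas):
--     L = len(dnas[0])
--     if any(len(d) != L for d in dnas):
--         return "Found incorrect DNA length"
--     tally = Counter((pos, ch) for d in dnas for pos, ch in enumerate(d))
--     if any(ch not in 'ATCG' for _, ch in tally):
--         return "Found incorrect nucleotide"
--     return '\n'.join(','.join(str(tally[pos, nuc]) for pos in range(L))
--                      for nuc in 'ATCG')
-- ===== Notes on version B (the rewrite author's own statement) =====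
-- stated objective: alternative
-- what changed: Replaces A's column-by-column loop that tallies each column into a fresh OrderedDict (appending one cell to each of four row lists per column) with a single flat Counter over (position, character) pairs built in one row-major sweep of the strings; validity is read off the counter's key set and the whole matrix is read off the counter afterwards.
import Mathlib
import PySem

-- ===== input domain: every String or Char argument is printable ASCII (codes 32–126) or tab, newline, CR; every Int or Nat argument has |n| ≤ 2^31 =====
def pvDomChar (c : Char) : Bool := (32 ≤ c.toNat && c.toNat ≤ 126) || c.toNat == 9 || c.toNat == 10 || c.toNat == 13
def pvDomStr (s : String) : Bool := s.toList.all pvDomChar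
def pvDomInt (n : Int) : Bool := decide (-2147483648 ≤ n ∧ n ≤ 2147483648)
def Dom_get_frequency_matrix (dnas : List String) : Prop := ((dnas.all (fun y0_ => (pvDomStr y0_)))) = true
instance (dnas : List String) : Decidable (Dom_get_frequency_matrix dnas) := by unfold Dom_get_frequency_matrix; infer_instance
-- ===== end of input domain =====

-- B replaces A's column-by-column OrderedDict tallying by ONE flat Counter keyed by
-- (position, character) built in a single row-major sweep, validity read off the
-- counter's key set, and the matrix read off the counter; objective: alternative.

-- ===== PORT A =====
-- inner 'for j in dnas' loop of A: tally column i into the OrderedDict; none = early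
-- 'return "Found incorrect nucleotide"'. (The pyGet? = none IndexError arm cannot be
-- reached: A only enters this loop after verifying that all lengths are equal.)
def pvAInner (i : Int) : List String → PySem.Dict Char Int → Option (PySem.Dict Char Int)
  | [], l => some l
  | j :: rest, l =>
    match PySem.Str.pyGet? j i with
    | none => none
    | some ch => if l.contains ch then pvAInner i rest (l.modify ch 0 (· + 1)) else none

-- outer 'for i in range(check[0])' loop of A, carrying the four row accumulators
def pvAOuter (dnas : List String) : List Int → List String → List String → List String → List String → String
  | [], la, lt, lc, lg =>
      PySem.Str.join "," la ++ "\n" ++ PySem.Str.join "," lt ++ "\n"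
        ++ PySem.Str.join "," lc ++ "\n" ++ PySem.Str.join "," lg
  | i :: rest, la, lt, lc, lg =>
    match pvAInner i dnas (PySem.Dict.ofList [('A',0),('T',0),('C',0),('G',0)]) with
    | none => "Found incorrect nucleotide"
    | some l =>
      let ans := l.values.map PySem.Int.toStr
      -- ans[0]…ans[3]: the dict always carries exactly the four keys, so the
      -- literal indices are in range and getD is exact
      pvAOuter dnas rest (la ++ [ans.getD 0 ""]) (lt ++ [ans.getD 1 ""])
        (lc ++ [ans.getD 2 ""]) (lg ++ [ans.getD 3 ""])

def get_frequency_matrix (dnas : List String) : String :=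
  let check := dnas.foldl (fun acc s => acc ++ [PySem.Str.len s]) []
  if (PySem.Set.ofList check).length > 1 then "Found incorrect DNA length"
  else
    -- check[0]: pyGetD is exact here; Pre_ (dnas ≠ []) excludes the IndexError input
    pvAOuter dnas (PySem.List.pyRange 0 (PySem.List.pyGetD check 0 0) 1) [] [] [] []

-- ===== PORT B =====
-- hand port of Python's enumerate(d) with int indices (PySem has no enumerate): exact
def pvEnum (i : Int) : List Char → List (Int × Char)
  | [] => []
  | c :: cs => (i, c) :: pvEnum (i + 1) cs

-- Python's locals L and tally are pure; they are written out at each use site.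
def get_frequency_matrix_alt (dnas : List String) : String :=
  -- dnas[0]: IndexError on the empty list, excluded by Pre_; pyGetD is exact otherwise
  if dnas.any (fun d => PySem.Str.len d != PySem.Str.len (PySem.List.pyGetD dnas 0 "")) then
    "Found incorrect DNA length"
  else
    -- "ch not in 'ATCG'": ch is a single character, so the substring test is membership
    if (PySem.Dict.counter (dnas.flatMap (fun d => pvEnum 0 d.toList))).keys.any
        (fun p => !(['A', 'T', 'C', 'G'].contains p.2)) then
      "Found incorrect nucleotide"
    else
      PySem.Str.join "\n" (['A', 'T', 'C', 'G'].map (fun nuc =>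
        PySem.Str.join "," ((PySem.List.pyRange 0 (PySem.Str.len (PySem.List.pyGetD dnas 0 ""))).map (fun pos =>
          PySem.Int.toStr ((PySem.Dict.counter (dnas.flatMap (fun d => pvEnum 0 d.toList))).getD (pos, nuc) 0)))))

-- ===== PRECONDITION & SPEC =====
-- Pre_ excludes only the empty list, on which both A and B raise IndexError.
def Pre_get_frequency_matrix (dnas : List String) : Prop := dnas ≠ []
instance (dnas : List String) : Decidable (Pre_get_frequency_matrix dnas) := by unfold Pre_get_frequency_matrix; infer_instance
def pvWitness_get_frequency_matrix : List String := ["AT", "CG"]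

def Spec_get_frequency_matrix (dnas : List String) (out : String) : Prop := out = get_frequency_matrix_alt dnas
instance (dnas : List String) (out : String) : Decidable (Spec_get_frequency_matrix dnas out) := by unfold Spec_get_frequency_matrix; infer_instance

-- ===== CLAIM (what is proved, stated in full; the proofs are below) =====
def Claim_equal_get_frequency_matrix : Prop := ∀ (dnas : List String), Dom_get_frequency_matrix dnas → Pre_get_frequency_matrix dnas → Spec_get_frequency_matrix dnas (get_frequency_matrix dnas)

-- ===== LEMMAS AND PROOFS =====

def pvGood (ch : Char) : Bool := ch == 'A' || ch == 'T' || ch == 'C' || ch == 'G'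

theorem pv_contains_eq_good (c : Char) : (['A', 'T', 'C', 'G'].contains c) = pvGood c := by
  simp only [pvGood, List.contains_eq_any_beq, List.any_cons, List.any_nil, Bool.or_false,
    Bool.or_assoc]

-- a list whose Python set has at most one element is constant
theorem pv_all_eq_of_set_le_one (xs : List Int) (hx : ¬ (PySem.Set.ofList xs).length > 1) :
    ∀ x ∈ xs, ∀ y ∈ xs, x = y := by
  intro x hxm y hym
  by_contra hne
  have hx' := (PySem.Set.mem_ofList xs x).2 hxm
  have hy' := (PySem.Set.mem_ofList xs y).2 hym
  have hnd := PySem.Set.nodup_ofList xs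
  have hsub : ({x, y} : Finset Int) ⊆ (PySem.Set.ofList xs).toFinset := by
    intro z hz
    simp only [Finset.mem_insert, Finset.mem_singleton] at hz
    rcases hz with rfl | rfl <;> simpa [List.mem_toFinset]
  have hc : ({x, y} : Finset Int).card = 2 := Finset.card_pair hne
  have := Finset.card_le_card hsub
  rw [hc, List.toFinset_card_of_nodup hnd] at this
  omega

-- the Python set of a constant nonempty list is a singleton
theorem pv_ofList_const (x : Int) (xs : List Int) (h : ∀ y ∈ xs, y = x) :
    PySem.Set.ofList (x :: xs) = [x] := by
  have hadd : PySem.Set.add ([] : PySem.Set Int) x = [x] := by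
    simp [PySem.Set.add, PySem.Set.contains]
  have hstep : ∀ ys : List Int, (∀ y ∈ ys, y = x) → List.foldl PySem.Set.add [x] ys = [x] := by
    intro ys
    induction ys with
    | nil => intro _; rfl
    | cons y ys ih =>
      intro hy
      have hx := hy y (by simp)
      subst hx
      simp only [List.foldl_cons]
      rw [show PySem.Set.add [y] y = [y] by simp [PySem.Set.add, PySem.Set.contains]]
      exact ih (fun z hz => hy z (by simp [hz]))
  simp only [PySem.Set.ofList, PySem.Set.empty, List.foldl_cons, hadd]
  exact hstep xs h

-- A's length test (more than one distinct length) equals B's (some length ≠ the first)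
theorem pv_cond_len (d0 : String) (rest : List String) :
    ((PySem.Set.ofList ((d0 :: rest).map (fun d => PySem.Str.len d))).length > 1) ↔
      ((d0 :: rest).any (fun d => PySem.Str.len d != PySem.Str.len d0) = true) := by
  constructor
  · intro hset
    by_contra hany
    have hall : ∀ d ∈ d0 :: rest, PySem.Str.len d = PySem.Str.len d0 := by
      intro d hd
      have := List.any_eq_false.1 (Bool.eq_false_iff.2 hany) d hd
      simpa using this
    have hconst : ∀ y ∈ rest.map (fun d => PySem.Str.len d), y = PySem.Str.len d0 := by
      intro y hy
      obtain ⟨d, hd, rfl⟩ := List.mem_map.1 hy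
      exact hall d (by simp [hd])
    rw [List.map_cons, pv_ofList_const _ _ hconst] at hset
    simp at hset
  · intro hany
    obtain ⟨d, hd, hne⟩ := List.any_eq_true.1 hany
    by_contra hle
    have hmem0 : PySem.Str.len d0 ∈ (d0 :: rest).map (fun d => PySem.Str.len d) :=
      List.mem_map_of_mem (by simp)
    exact absurd (pv_all_eq_of_set_le_one _ hle _ (List.mem_map_of_mem hd) _ hmem0)
      (by simpa using hne)

-- any over set(xs) = any over xs (pure existence, order-independent)
theorem pv_any_ofList {α : Type} [BEq α] [LawfulBEq α] (l : List α) (f : α → Bool) :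
    (PySem.Set.ofList l).any f = l.any f := by
  rcases h : l.any f with _ | _
  · rw [Bool.eq_false_iff]
    intro hc
    obtain ⟨x, hx, hfx⟩ := List.any_eq_true.1 hc
    have := List.any_eq_false.1 h x ((PySem.Set.mem_ofList l x).1 hx)
    exact this hfx
  · obtain ⟨x, hx, hfx⟩ := List.any_eq_true.1 h
    exact List.any_eq_true.2 ⟨x, (PySem.Set.mem_ofList l x).2 hx, hfx⟩

theorem pv_str_get (j : String) (i : Int) (hi : 0 ≤ i) (hj : i < (j.toList.length : Int)) :
    PySem.Str.pyGet? j i = some (j.toList.getD i.toNat ' ') := by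
  simp only [PySem.Str.pyGet?, PySem.Chars.pyGet?]
  rw [PySem.List.pyGet?_eq_some_getElem j.toList hi hj]
  rw [List.getD_eq_getElem?_getD, List.getElem?_eq_getElem (by omega)]
  simp

theorem pv_contains_true (a t c g : Int) (ch : Char)
    (h : ch = 'A' ∨ ch = 'T' ∨ ch = 'C' ∨ ch = 'G') :
    (PySem.Dict.ofList [('A',a),('T',t),('C',c),('G',g)]).contains ch = true := by
  rcases h with rfl | rfl | rfl | rfl <;>
    simp [PySem.Dict.ofList, PySem.Dict.update, PySem.Dict.contains, PySem.Dict.empty,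
      PySem.Dict.insert]

theorem pv_contains_false (a t c g : Int) (ch : Char)
    (hA : ch ≠ 'A') (hT : ch ≠ 'T') (hC : ch ≠ 'C') (hG : ch ≠ 'G') :
    (PySem.Dict.ofList [('A',a),('T',t),('C',c),('G',g)]).contains ch = false := by
  simp only [PySem.Dict.ofList, PySem.Dict.update, PySem.Dict.contains, PySem.Dict.empty,
    PySem.Dict.insert]
  simp
  exact ⟨fun h => hA h.symm, fun h => hT h.symm, fun h => hC h.symm, fun h => hG h.symm⟩

theorem pv_modify_A (a t c g : Int) :
    (PySem.Dict.ofList [('A',a),('T',t),('C',c),('G',g)]).modify 'A' 0 (· + 1)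
      = PySem.Dict.ofList [('A',a+1),('T',t),('C',c),('G',g)] := by
  simp [PySem.Dict.ofList, PySem.Dict.update, PySem.Dict.modify, PySem.Dict.empty,
    PySem.Dict.contains, PySem.Dict.getD, PySem.Dict.get?, PySem.Dict.insert]

theorem pv_modify_T (a t c g : Int) :
    (PySem.Dict.ofList [('A',a),('T',t),('C',c),('G',g)]).modify 'T' 0 (· + 1)
      = PySem.Dict.ofList [('A',a),('T',t+1),('C',c),('G',g)] := by
  simp [PySem.Dict.ofList, PySem.Dict.update, PySem.Dict.modify, PySem.Dict.empty,
    PySem.Dict.contains, PySem.Dict.getD, PySem.Dict.get?, PySem.Dict.insert]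

theorem pv_modify_C (a t c g : Int) :
    (PySem.Dict.ofList [('A',a),('T',t),('C',c),('G',g)]).modify 'C' 0 (· + 1)
      = PySem.Dict.ofList [('A',a),('T',t),('C',c+1),('G',g)] := by
  simp [PySem.Dict.ofList, PySem.Dict.update, PySem.Dict.modify, PySem.Dict.empty,
    PySem.Dict.contains, PySem.Dict.getD, PySem.Dict.get?, PySem.Dict.insert]

theorem pv_modify_G (a t c g : Int) :
    (PySem.Dict.ofList [('A',a),('T',t),('C',c),('G',g)]).modify 'G' 0 (· + 1)
      = PySem.Dict.ofList [('A',a),('T',t),('C',c),('G',g+1)] := by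
  simp [PySem.Dict.ofList, PySem.Dict.update, PySem.Dict.modify, PySem.Dict.empty,
    PySem.Dict.contains, PySem.Dict.getD, PySem.Dict.get?, PySem.Dict.insert]

theorem pv_values_four (a t c g : Int) :
    (PySem.Dict.ofList [('A',a),('T',t),('C',c),('G',g)]).values = [a, t, c, g] := by
  simp [PySem.Dict.ofList, PySem.Dict.update, PySem.Dict.values, PySem.Dict.empty,
    PySem.Dict.insert]

-- A's inner dict loop computes the four counts of column i (or none on a bad char)
theorem pv_inner_char (i : Int) (hi : 0 ≤ i) (js : List String)
    (hlen : ∀ s ∈ js, i < (s.toList.length : Int)) (a t c g : Int) :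
    pvAInner i js (PySem.Dict.ofList [('A',a),('T',t),('C',c),('G',g)]) =
      (if (js.map (fun s => s.toList.getD i.toNat ' ')).all pvGood then
        some (PySem.Dict.ofList
          [('A', a + ((js.map (fun s => s.toList.getD i.toNat ' ')).count 'A' : Int)),
           ('T', t + ((js.map (fun s => s.toList.getD i.toNat ' ')).count 'T' : Int)),
           ('C', c + ((js.map (fun s => s.toList.getD i.toNat ' ')).count 'C' : Int)),
           ('G', g + ((js.map (fun s => s.toList.getD i.toNat ' ')).count 'G' : Int))])
       else none) := by
  induction js generalizing a t c g with
  | nil => simp [pvAInner]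
  | cons j js ih =>
    have hj := hlen j (by simp)
    have hlen' : ∀ s ∈ js, i < (s.toList.length : Int) := fun s hs => hlen s (by simp [hs])
    simp only [pvAInner, pv_str_get j i hi hj, List.map_cons, List.all_cons, List.count_cons]
    by_cases hg : pvGood (j.toList.getD i.toNat ' ') = true
    · have hsplit : j.toList.getD i.toNat ' ' = 'A' ∨ j.toList.getD i.toNat ' ' = 'T' ∨
          j.toList.getD i.toNat ' ' = 'C' ∨ j.toList.getD i.toNat ' ' = 'G' := by
        have h := hg; simp [pvGood] at h; tauto
      rcases hsplit with heq | heq | heq | heq <;> rw [heq] <;>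
        [rw [pv_contains_true a t c g 'A' (by simp), if_pos rfl, pv_modify_A, ih hlen'];
         rw [pv_contains_true a t c g 'T' (by simp), if_pos rfl, pv_modify_T, ih hlen'];
         rw [pv_contains_true a t c g 'C' (by simp), if_pos rfl, pv_modify_C, ih hlen'];
         rw [pv_contains_true a t c g 'G' (by simp), if_pos rfl, pv_modify_G, ih hlen']] <;>
      simp [pvGood] <;> split <;> simp <;> ring_nf
    · have hsplit : j.toList.getD i.toNat ' ' ≠ 'A' ∧ j.toList.getD i.toNat ' ' ≠ 'T' ∧
          j.toList.getD i.toNat ' ' ≠ 'C' ∧ j.toList.getD i.toNat ' ' ≠ 'G' := by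
        refine ⟨fun h => ?_, fun h => ?_, fun h => ?_, fun h => ?_⟩ <;>
          (rw [h] at hg; exact hg (by decide))
      rw [pv_contains_false a t c g _ hsplit.1 hsplit.2.1 hsplit.2.2.1 hsplit.2.2.2]
      simp only [List.getD_eq_getElem?_getD] at hg
      simp [hg]

-- characterisation of A's outer loop: error iff some listed column has a bad
-- character, else the four comma rows of per-column counts
theorem pv_A_char (dnas : List String) (N : Nat) (hlen : ∀ s ∈ dnas, s.toList.length = N)
    (idxs : List Int) (hidx : ∀ i ∈ idxs, 0 ≤ i ∧ i < (N : Int))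
    (la lt lc lg : List String) :
    pvAOuter dnas idxs la lt lc lg =
      if idxs.all (fun i => (dnas.map (fun s => s.toList.getD i.toNat ' ')).all pvGood) then
        PySem.Str.join "," (la ++ idxs.map (fun i =>
            PySem.Int.toStr ((dnas.map (fun s => s.toList.getD i.toNat ' ')).count 'A'))) ++ "\n" ++
        PySem.Str.join "," (lt ++ idxs.map (fun i =>
            PySem.Int.toStr ((dnas.map (fun s => s.toList.getD i.toNat ' ')).count 'T'))) ++ "\n" ++
        PySem.Str.join "," (lc ++ idxs.map (fun i =>
            PySem.Int.toStr ((dnas.map (fun s => s.toList.getD i.toNat ' ')).count 'C'))) ++ "\n" ++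
        PySem.Str.join "," (lg ++ idxs.map (fun i =>
            PySem.Int.toStr ((dnas.map (fun s => s.toList.getD i.toNat ' ')).count 'G')))
      else "Found incorrect nucleotide" := by
  induction idxs generalizing la lt lc lg with
  | nil => simp [pvAOuter]
  | cons i idxs ih =>
    have hi := hidx i (by simp)
    have hlen' : ∀ s ∈ dnas, i < (s.toList.length : Int) := by
      intro s hs; rw [hlen s hs]; exact hi.2
    simp only [pvAOuter]
    rw [pv_inner_char i hi.1 dnas hlen' 0 0 0 0]
    by_cases hg : (dnas.map (fun s => s.toList.getD i.toNat ' ')).all pvGood = true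
    · rw [if_pos hg]
      simp only [pv_values_four, zero_add, List.map_cons, List.map_nil,
        List.getD_cons_zero, List.getD_cons_succ]
      rw [ih (fun j hj => hidx j (by simp [hj]))]
      simp only [List.all_cons, hg, Bool.true_and]
      by_cases hrest : (idxs.all fun i =>
          (List.map (fun s => s.toList.getD i.toNat ' ') dnas).all pvGood) = true
      · rw [if_pos hrest, if_pos hrest]
        simp [List.append_assoc]
      · rw [if_neg hrest, if_neg hrest]
    · rw [if_neg hg, List.all_cons,
        if_neg (fun h => hg (by rw [Bool.and_eq_true] at h; exact h.1))]

-- membership in the hand-ported enumerate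
theorem pv_enum_mem (cs : List Char) (j : Int) (p : Int × Char) :
    p ∈ pvEnum j cs ↔ ∃ k : Nat, k < cs.length ∧ p = (j + k, cs.getD k ' ') := by
  induction cs generalizing j with
  | nil => simp [pvEnum]
  | cons c cs ih =>
    simp only [pvEnum, List.mem_cons]
    constructor
    · rintro (rfl | hptail)
      · exact ⟨0, by simp, by simp⟩
      · obtain ⟨k, hk, hpk⟩ := (ih (j + 1)).1 hptail
        refine ⟨k + 1, by simpa using Nat.succ_lt_succ hk, ?_⟩
        rw [hpk]
        simp only [List.getD_cons_succ, Prod.mk.injEq, and_true]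
        push_cast; ring
    · rintro ⟨k, hk, hpk⟩
      cases k with
      | zero => exact Or.inl (by simpa using hpk)
      | succ k =>
        refine Or.inr ((ih (j + 1)).2 ⟨k, by simpa using hk, ?_⟩)
        rw [hpk]
        simp only [List.getD_cons_succ, Prod.mk.injEq, and_true]
        push_cast; ring

-- counting one (index, char) pair in the enumerate of one row
theorem pv_enum_count (cs : List Char) (j i : Int) (nuc : Char) :
    (pvEnum j cs).count (i, nuc) =
      if j ≤ i ∧ i < j + cs.length ∧ cs.getD (i - j).toNat ' ' = nuc then 1 else 0 := by
  induction cs generalizing j with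
  | nil => simp [pvEnum]; omega
  | cons c cs ih =>
    have hcc : (pvEnum j (c :: cs)).count (i, nuc)
        = (pvEnum (j + 1) cs).count (i, nuc) + (if (j, c) = (i, nuc) then 1 else 0) := by
      simp [pvEnum, List.count_cons]
    rw [hcc, ih (j + 1)]
    by_cases hij : i = j
    · subst hij
      rw [if_neg (show ¬(i + 1 ≤ i ∧ i < i + 1 + (cs.length : Int) ∧
          cs.getD (i - (i + 1)).toNat ' ' = nuc) from fun h => absurd h.1 (by omega))]
      have h0 : (i - i).toNat = 0 := by omega
      by_cases hc : c = nuc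
      · subst hc
        rw [if_pos (show ((i : Int), c) = (i, c) from rfl), if_pos (show i ≤ i ∧ i < i + ((c :: cs).length : Int) ∧
            (c :: cs).getD (i - i).toNat ' ' = c from
          ⟨le_refl i, by simp only [List.length_cons]; push_cast; omega, by rw [h0, List.getD_cons_zero]⟩)]
      · rw [if_neg (show ¬((i, c) = (i, nuc)) from by
            intro h; injection h with h1 h2; exact hc h2),
          if_neg (show ¬(i ≤ i ∧ i < i + ((c :: cs).length : Int) ∧
              (c :: cs).getD (i - i).toNat ' ' = nuc) from fun h => hc (by
            have h3 := h.2.2; rw [h0, List.getD_cons_zero] at h3; exact h3))]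
    · have htn : i > j → (i - j).toNat = (i - (j + 1)).toNat + 1 := by omega
      have htail : (j + 1 ≤ i ∧ i < j + 1 + (cs.length : Int) ∧
            cs.getD (i - (j + 1)).toNat ' ' = nuc)
          ↔ (j ≤ i ∧ i < j + ((c :: cs).length : Int) ∧
            (c :: cs).getD (i - j).toNat ' ' = nuc) := by
        constructor
        · rintro ⟨h1, h2, h3⟩
          refine ⟨by omega, by simp only [List.length_cons] at h2 ⊢; push_cast at h2 ⊢; omega, ?_⟩
          rw [htn (by omega), List.getD_cons_succ]; exact h3
        · rintro ⟨h1, h2, h3⟩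
          have hjlt : j < i := lt_of_le_of_ne h1 (fun h => hij h.symm)
          refine ⟨by omega, by simp only [List.length_cons] at h2 ⊢; push_cast at h2 ⊢; omega, ?_⟩
          rw [htn hjlt, List.getD_cons_succ] at h3; exact h3
      rw [if_neg (show ¬((j, c) = (i, nuc)) from by
          intro h; injection h with h1 h2; exact hij h1.symm)]
      by_cases hr : j ≤ i ∧ i < j + ((c :: cs).length : Int) ∧
          (c :: cs).getD (i - j).toNat ' ' = nuc
      · rw [if_pos hr, if_pos (htail.2 hr)]
      · rw [if_neg hr, if_neg (fun h => hr (htail.1 h))]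

-- the flat counter's count of (i, nuc) is the count of nuc in column i
theorem pv_pairs_count (dnas : List String) (N : Nat) (hlen : ∀ s ∈ dnas, s.toList.length = N)
    (i : Int) (h0 : 0 ≤ i) (hN : i < (N : Int)) (nuc : Char) :
    (dnas.flatMap (fun d => pvEnum 0 d.toList)).count (i, nuc)
      = (dnas.map (fun s => s.toList.getD i.toNat ' ')).count nuc := by
  induction dnas with
  | nil => simp
  | cons d ds ih =>
    have hd := hlen d (by simp)
    simp only [List.flatMap_cons, List.count_append, List.map_cons, List.count_cons]
    rw [ih (fun s hs => hlen s (by simp [hs]))]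
    rw [pv_enum_count]
    have hsub : (i - 0).toNat = i.toNat := by omega
    by_cases hc : d.toList.getD i.toNat ' ' = nuc
    · rw [if_pos ⟨h0, by rw [hd]; omega, by rw [hsub]; exact hc⟩]
      rw [List.getD_eq_getElem?_getD] at hc
      simp [hc, add_comm]
    · rw [if_neg (by rintro ⟨_, _, h3⟩; exact hc (by rwa [hsub] at h3))]
      rw [List.getD_eq_getElem?_getD] at hc
      simp [hc]

-- the counter's key set holds a non-ATCG character iff some listed column does
theorem pv_bad_iff (dnas : List String) (N : Nat) (hlen : ∀ s ∈ dnas, s.toList.length = N) :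
    ((dnas.flatMap (fun d => pvEnum 0 d.toList)).any
        (fun p => !(['A', 'T', 'C', 'G'].contains p.2)) = true)
      ↔ ¬ ((PySem.List.pyRange 0 (N : Int)).all
          (fun i => (dnas.map (fun s => s.toList.getD i.toNat ' ')).all pvGood) = true) := by
  constructor
  · intro hany hall
    obtain ⟨p, hp, hbad⟩ := List.any_eq_true.1 hany
    obtain ⟨d, hd, hpe⟩ := List.mem_flatMap.1 hp
    obtain ⟨k, hk, rfl⟩ := (pv_enum_mem d.toList 0 p).1 hpe
    have hkN : k < N := by rw [← hlen d hd]; exact hk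
    have hmem : ((0 : Int) + (k : Int)) ∈ PySem.List.pyRange 0 (N : Int) :=
      PySem.List.mem_pyRange_one.2 ⟨by positivity, by omega⟩
    have hcol := List.all_eq_true.1 (List.all_eq_true.1 hall _ hmem)
      (d.toList.getD ((0 : Int) + (k : Int)).toNat ' ')
      (List.mem_map_of_mem hd)
    rw [pv_contains_eq_good] at hbad
    have hidx : ((0 : Int) + (k : Int)).toNat = k := by omega
    rw [hidx, List.getD_eq_getElem?_getD] at hcol
    simp [hcol] at hbad
  · intro hnall
    rw [List.all_eq_true] at hnall
    push_neg at hnall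
    obtain ⟨i, hi, hcolb⟩ := hnall
    rw [ne_eq, Bool.not_eq_true, List.all_eq_false] at hcolb
    obtain ⟨ch, hch, hbad⟩ := hcolb
    rw [Bool.not_eq_true] at hbad
    obtain ⟨s, hs, rfl⟩ := List.mem_map.1 hch
    have hib := PySem.List.mem_pyRange_one.1 hi
    refine List.any_eq_true.2 ⟨(i, s.toList.getD i.toNat ' '), ?_, ?_⟩
    · refine List.mem_flatMap.2 ⟨s, hs, (pv_enum_mem s.toList 0 _).2 ⟨i.toNat, ?_, ?_⟩⟩
      · rw [hlen s hs]; omega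
      · simp only [Prod.mk.injEq]
        exact ⟨by omega, by simp⟩
    · rw [pv_contains_eq_good]
      simpa using hbad

-- '\n'.join of exactly four rows is A's explicit concatenation
theorem pv_join4 (a b c d : String) :
    PySem.Str.join "\n" [a, b, c, d] = a ++ "\n" ++ b ++ "\n" ++ c ++ "\n" ++ d := by
  have hofcons : ∀ x : List Char, String.ofList ('\n' :: x) = "\n" ++ String.ofList x := by
    intro x
    rw [show ('\n' :: x) = ['\n'] ++ x from rfl, String.ofList_append]
  simp only [PySem.Str.join, PySem.Chars.join, List.intercalate, List.map, List.intersperse,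
    List.flatten]
  simp [String.ofList_append, hofcons, String.append_assoc]

-- ===== VERDICT =====
theorem get_frequency_matrix_spec : Claim_equal_get_frequency_matrix := by
  intro dnas _ hpre
  unfold Spec_get_frequency_matrix get_frequency_matrix get_frequency_matrix_alt
  cases dnas with
  | nil => exact absurd rfl hpre
  | cons d0 rest =>
    rw [PySem.List.foldl_append_singleton_eq_map]
    simp only [List.nil_append]
    have hcond := pv_cond_len d0 rest
    have hL : PySem.Str.len (PySem.List.pyGetD (d0 :: rest) 0 "") = PySem.Str.len d0 := by
      simp [PySem.List.pyGetD]
    simp only [hL]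
    by_cases hset : (PySem.Set.ofList ((d0 :: rest).map (fun d => PySem.Str.len d))).length > 1
    · rw [if_pos hset, if_pos (hcond.1 hset)]
    · rw [if_neg hset, if_neg (fun h => hset (hcond.2 h))]
      have hall : ∀ d ∈ d0 :: rest, PySem.Str.len d = PySem.Str.len d0 := by
        intro d hd
        exact pv_all_eq_of_set_le_one _ hset _ (List.mem_map_of_mem hd) _
          (List.mem_map_of_mem (by simp))
      have hlen : ∀ s ∈ d0 :: rest, s.toList.length = d0.toList.length := by
        intro s hs
        have h1 := hall s hs
        rw [PySem.Str.len_eq, PySem.Str.len_eq] at h1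
        exact_mod_cast h1
      have hget0 : PySem.List.pyGetD ((d0 :: rest).map (fun d => PySem.Str.len d)) 0 0
          = (d0.toList.length : Int) := by
        simp [PySem.List.pyGetD, PySem.Str.len_eq]
      rw [hget0, PySem.Str.len_eq]
      have hidx : ∀ i ∈ PySem.List.pyRange 0 (d0.toList.length : Int),
          0 ≤ i ∧ i < (d0.toList.length : Int) := fun i hi => PySem.List.mem_pyRange_one.1 hi
      rw [pv_A_char (d0 :: rest) d0.toList.length hlen _ hidx [] [] [] []]
      rw [PySem.Dict.keys_counter, pv_any_ofList]
      by_cases hgood : (PySem.List.pyRange 0 (d0.toList.length : Int)).all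
          (fun i => ((d0 :: rest).map (fun s => s.toList.getD i.toNat ' ')).all pvGood) = true
      · rw [if_pos hgood]
        rw [if_neg (by
          intro hbad
          exact (pv_bad_iff (d0 :: rest) d0.toList.length hlen).1 hbad hgood)]
        have hrow : ∀ nuc : Char,
            (PySem.List.pyRange 0 (d0.toList.length : Int)).map (fun pos =>
              PySem.Int.toStr (((PySem.Dict.counter
                ((d0 :: rest).flatMap (fun d => pvEnum 0 d.toList))).getD (pos, nuc) 0)))
            = (PySem.List.pyRange 0 (d0.toList.length : Int)).map (fun i =>
                PySem.Int.toStr (((d0 :: rest).map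
                  (fun s => s.toList.getD i.toNat ' ')).count nuc : Int)) := by
          intro nuc
          refine List.map_congr_left (fun i hi => ?_)
          have hib := PySem.List.mem_pyRange_one.1 hi
          rw [PySem.Dict.getD_counter,
            pv_pairs_count (d0 :: rest) d0.toList.length hlen i hib.1 hib.2]
        simp only [List.map_cons, List.map_nil, List.nil_append]
        rw [pv_join4, hrow 'A', hrow 'T', hrow 'C', hrow 'G']
        simp only [List.map_cons]
      · rw [if_neg hgood]
        rw [if_pos ((pv_bad_iff (d0 :: rest) d0.toList.length hlen).2 hgood)]
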